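-- pv_equiv track=rewrite | github.com/sunilgitb/DSAlgo-Python | 17_Bit-Manipulation/11. Power Set using Bit Manipulation.py | AllPossibleStrings
-- ===== SOURCE A (Python) =====
-- def AllPossibleStrings(s: str):
--     n = len(s)
--     p = 2 ** n   # total number of subsets
--     res = []
--     for i in range(1, p):
--         tmp = ''
--         for j in range(n):
--             if i & (1 << j):
--                 tmp += s[j]
--         res.append(tmp)
--     return sorted(res)
-- ===== SOURCE B (Python) =====
-- def AllPossibleStrings(s: str):
--     # Recursive include/exclude power set (empty subset first), drop the empty
--     # subset, then sort -- no bitmask arithmetic.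
--     def pw(chars):
--         if not chars:
--             return ['']
--         rest = pw(chars[1:])
--         out = []
--         for t in rest:
--             out.append(t)
--             out.append(chars[0] + t)
--         return out
--     return sorted(pw(s)[1:])
-- ===== Notes on version B (the rewrite author's own statement) =====
-- stated objective: alternative
-- what changed: Replaced the integer-bitmask enumeration of subsets (testing bit j of every i in range(1, 2**n)) by a recursive include/exclude power-set construction that drops the empty subset and sorts.
import Mathlib
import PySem

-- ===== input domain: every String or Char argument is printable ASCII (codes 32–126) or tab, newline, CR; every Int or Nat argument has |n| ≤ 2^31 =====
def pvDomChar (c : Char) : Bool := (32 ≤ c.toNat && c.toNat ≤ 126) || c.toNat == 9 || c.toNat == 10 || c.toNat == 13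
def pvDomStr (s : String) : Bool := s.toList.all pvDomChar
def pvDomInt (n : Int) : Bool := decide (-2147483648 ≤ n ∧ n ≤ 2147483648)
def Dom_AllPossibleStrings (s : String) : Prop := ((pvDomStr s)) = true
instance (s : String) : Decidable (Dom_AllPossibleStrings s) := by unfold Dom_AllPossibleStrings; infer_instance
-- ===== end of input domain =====

-- B replaces A's integer-bitmask subset enumeration by a recursive include/exclude
-- power-set construction (alternative algorithm; the return values agree).

-- ===== PORT A =====
-- bitmask enumeration: for i in range(1, 2**n), collect s[j] for every set bit j, then sort.
def AllPossibleStrings (s : String) : List String :=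
  let n : Int := PySem.Str.len s
  let p : Int := 2 ^ n.toNat            -- p = 2 ** n  (n = len(s) ≥ 0, so toNat is exact)
  let res : List String :=
    (PySem.List.pyRange 1 p 1).foldl (fun res i =>
      let tmp : List Char :=
        (PySem.List.pyRange 0 n 1).foldl (fun tmp j =>
          if PySem.Int.band i ((1 : Int) <<< j.toNat) ≠ 0 then
            tmp ++ (PySem.Str.pyGet? s j).toList    -- s[j]; j ∈ range(n) is in range, so exactly one char
          else tmp) []
      res ++ [String.ofList tmp]) []
  PySem.List.sorted res (fun x => x) false

-- ===== PORT B =====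
-- pw(chars): recursive power set, empty subset first; include/exclude each element.
def pwAlt : List Char → List String
  | [] => [""]
  | c :: cs => (pwAlt cs).foldl (fun out t => out ++ [t, String.ofList (c :: t.toList)]) []

def AllPossibleStrings_alt (s : String) : List String :=
  PySem.List.sorted ((pwAlt s.toList).drop 1) (fun x => x) false   -- sorted(pw(s)[1:])

-- ===== PRECONDITION & SPEC =====
def Spec_AllPossibleStrings (s : String) (out : List String) : Prop := out = AllPossibleStrings_alt s
instance (s : String) (out : List String) : Decidable (Spec_AllPossibleStrings s out) := by unfold Spec_AllPossibleStrings; infer_instance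

-- ===== CLAIM (what is proved, stated in full; the proofs are below) =====
def Claim_equal_AllPossibleStrings : Prop := ∀ (s : String), Dom_AllPossibleStrings s → Spec_AllPossibleStrings s (AllPossibleStrings s)

-- ===== LEMMAS AND PROOFS =====

-- the characters of l picked by the set bits of i (bit 0 → first character)
def charPick : List Char → Nat → List Char
  | [], _ => []
  | c :: cs, i => (if i.testBit 0 then [c] else []) ++ charPick cs (i / 2)

theorem bit_test_iff (i k : Nat) : (i &&& 2 ^ k ≠ 0) ↔ i.testBit k := by
  rw [Nat.and_two_pow]
  rcases h : i.testBit k <;> simp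

-- A's inner loop computes charPick
theorem inner_eq_charPick (l : List Char) (i : Nat) (acc : List Char) :
    (List.range l.length).foldl
      (fun tmp k => if i.testBit k then tmp ++ l[k]?.toList else tmp) acc
    = acc ++ charPick l i := by
  induction l generalizing i acc with
  | nil => simp [charPick]
  | cons c cs ih =>
    rw [List.length_cons, List.range_succ_eq_map, List.foldl_cons, List.foldl_map]
    have h1 : ∀ (tmp : List Char) (k : Nat),
        (if i.testBit (k + 1) then tmp ++ (c :: cs)[k + 1]?.toList else tmp)
        = (if (i / 2).testBit k then tmp ++ cs[k]?.toList else tmp) := by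
      intro tmp k
      rw [Nat.testBit_add_one]
      simp
    simp only [h1]
    rw [ih (i / 2)]
    rcases h : i.testBit 0 <;> simp [charPick, h]

theorem pv_foldl_ext {α β : Type} (f g : β → α → β) (h : ∀ b a, f b a = g b a)
    (init : β) (l : List α) : l.foldl f init = l.foldl g init := by
  rw [show f = g from funext fun b => funext fun a => h b a]

theorem inner_fold_eq (s : String) (m : Nat) :
    ((PySem.List.pyRange 0 (s.toList.length : Int) 1).foldl (fun tmp j =>
        if PySem.Int.band (m : Int) ((1 : Int) <<< j.toNat) ≠ 0 then
          tmp ++ (PySem.Str.pyGet? s j).toList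
        else tmp) [])
    = charPick s.toList m := by
  rw [PySem.List.pyRange_zero_nat, List.foldl_map]
  refine Eq.trans
    (pv_foldl_ext _ (fun tmp k => if m.testBit k then tmp ++ s.toList[k]?.toList else tmp)
      ?_ [] (List.range s.toList.length))
    ((inner_eq_charPick s.toList m []).trans (List.nil_append _))
  intro tmp k
  rw [Int.toNat_natCast, Int.one_shiftLeft, PySem.Int.band_natCast, PySem.Str.pyGet?_natCast]
  beta_reduce
  by_cases hb : m.testBit k
  · have hx : m &&& 2 ^ k ≠ 0 := (bit_test_iff m k).2 hb
    simp [Int.natCast_eq_zero, hx, hb]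
  · have hx : m &&& 2 ^ k = 0 := by
      by_contra h; exact hb ((bit_test_iff m k).1 h)
    simp [hx, hb]

-- List.range (2*m) visits 2k, 2k+1 for k < m
theorem pv_range_two_mul (m : Nat) :
    List.range (2 * m) = (List.range m).flatMap (fun k => [2 * k, 2 * k + 1]) := by
  induction m with
  | zero => rfl
  | succ m ih =>
    have h2 : 2 * (m + 1) = (2 * m + 1) + 1 := by ring
    rw [h2, List.range_succ, List.range_succ, ih, List.range_succ]
    simp

theorem foldl_append_pair {α β : Type} (xs : List α) (f g : α → β) (init : List β) :
    xs.foldl (fun out t => out ++ [f t, g t]) init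
    = init ++ xs.flatMap (fun t => [f t, g t]) := by
  induction xs generalizing init with
  | nil => simp
  | cons x xs ih => simp [ih]

-- main bridge: the bitmask-indexed family equals the recursive power set
theorem map_charPick_eq_pwAlt (l : List Char) :
    (List.range (2 ^ l.length)).map (fun i => String.ofList (charPick l i)) = pwAlt l := by
  induction l with
  | nil => rfl
  | cons c cs ih =>
    rw [List.length_cons, pow_succ, mul_comm, pv_range_two_mul, List.map_flatMap]
    rw [pwAlt, foldl_append_pair, ← ih, List.flatMap_map, List.nil_append]
    apply List.flatMap_congr
    intro k _
    have hd0 : 2 * k / 2 = k := by omega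
    have hd1 : (2 * k + 1) / 2 = k := by omega
    simp [charPick, hd0, hd1, -String.ofList_append]

-- ===== VERDICT (by name: the statement is the Claim_ definition above) =====
theorem AllPossibleStrings_spec : Claim_equal_AllPossibleStrings := by
  intro s _
  unfold Spec_AllPossibleStrings AllPossibleStrings AllPossibleStrings_alt
  simp only [PySem.Str.len_eq, Int.toNat_natCast]
  congr 1
  rw [PySem.List.foldl_append_singleton_eq_map, List.nil_append]
  have hmap : (PySem.List.pyRange 1 (2 ^ s.toList.length : Int) 1).map
      (fun i => String.ofList
        ((PySem.List.pyRange 0 (s.toList.length : Int) 1).foldl (fun tmp j =>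
          if PySem.Int.band i ((1 : Int) <<< j.toNat) ≠ 0 then
            tmp ++ (PySem.Str.pyGet? s j).toList
          else tmp) []))
      = (PySem.List.pyRange 1 (2 ^ s.toList.length : Int) 1).map
          (fun i => String.ofList (charPick s.toList i.toNat)) := by
    apply List.map_congr_left
    intro i hi
    have h0 : (0 : Int) ≤ i := by linarith [(PySem.List.mem_pyRange_one.1 hi).1]
    obtain ⟨m, rfl⟩ : ∃ m : Nat, i = (m : Int) := ⟨i.toNat, (Int.toNat_of_nonneg h0).symm⟩
    rw [Int.toNat_natCast, inner_fold_eq s m]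
  rw [hmap]
  have h01 : PySem.List.pyRange 0 (2 ^ s.toList.length : Int) 1
      = 0 :: PySem.List.pyRange 1 (2 ^ s.toList.length : Int) 1 :=
    PySem.List.pyRange_one_cons (by positivity)
  have htail : (PySem.List.pyRange 1 (2 ^ s.toList.length : Int) 1).map
      (fun i => String.ofList (charPick s.toList i.toNat))
      = ((PySem.List.pyRange 0 (2 ^ s.toList.length : Int) 1).map
          (fun i => String.ofList (charPick s.toList i.toNat))).drop 1 := by
    rw [h01]; simp
  have hp : ((2 : Int) ^ s.toList.length) = ((2 ^ s.toList.length : Nat) : Int) := by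
    push_cast; ring
  rw [htail, hp, PySem.List.pyRange_zero_nat, List.map_map]
  have hcomp : ((fun (i : Int) => String.ofList (charPick s.toList i.toNat)) ∘ fun (k : Nat) => (k : Int))
      = fun k => String.ofList (charPick s.toList k) := by
    funext k; simp
  rw [hcomp, map_charPick_eq_pwAlt]
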